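-- pv_equiv track=rewrite | github.com/matthewlevy97/Trapline | var/linux_fs/imports/chmod.py | _convert_to_octal
-- ===== SOURCE A (Python) =====
-- import stat
--
-- def _convert_to_octal(original_mode: int, mode: str) -> int:
--     ret = original_mode
--
--     remove = False
--     for c in mode:
--         if c == '-':
--             remove = True
--         elif c == '+':
--             remove = False
--
--         if remove:
--             if c == 'x':
--                 ret &= ~(stat.S_IXUSR | stat.S_IXGRP)
--             elif c == 'r':
--                 ret &= ~(stat.S_IRUSR | stat.S_IRGRP)
--             elif c == 'w':
--                 ret &= ~(stat.S_IWUSR | stat.S_IWGRP)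
--         else:
--             if c == 'x':
--                 ret |= (stat.S_IXUSR | stat.S_IXGRP)
--             elif c == 'r':
--                 ret |= (stat.S_IRUSR | stat.S_IRGRP)
--             elif c == 'w':
--                 ret |= (stat.S_IWUSR | stat.S_IWGRP)
--     return ret
-- ===== SOURCE B (Python) =====
-- # stat masks inlined: S_IRUSR|S_IRGRP = 0o440, S_IWUSR|S_IWGRP = 0o220, S_IXUSR|S_IXGRP = 0o110
-- def _convert_to_octal(original_mode: int, mode: str) -> int:
--     # Phase 1: one scan records, per rwx letter, the sign in force at its
--     # LAST occurrence (dict overwrite = last write wins).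
--     ops = {}
--     remove = False
--     for c in mode:
--         if c == '-':
--             remove = True
--         elif c == '+':
--             remove = False
--         elif c == 'r' or c == 'w' or c == 'x':
--             ops[c] = remove
--     # Phase 2: apply the recorded decisions to the mode bits.
--     ret = original_mode
--     for c, rem in ops.items():
--         if c == 'r':
--             mask = 0o440
--         elif c == 'w':
--             mask = 0o220
--         else:
--             mask = 0o110
--         ret = ret & ~mask if rem else ret | mask
--     return ret
-- ===== Notes on version B (the rewrite author's own statement) =====
-- stated objective: alternative
-- what changed: A mutates the mode bits immediately at every letter while scanning; B scans once recording only the last signed decision per rwx letter in a dict (last write wins) and then applies each recorded set/clear to the mode bits in a separate pass.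
import Mathlib
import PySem

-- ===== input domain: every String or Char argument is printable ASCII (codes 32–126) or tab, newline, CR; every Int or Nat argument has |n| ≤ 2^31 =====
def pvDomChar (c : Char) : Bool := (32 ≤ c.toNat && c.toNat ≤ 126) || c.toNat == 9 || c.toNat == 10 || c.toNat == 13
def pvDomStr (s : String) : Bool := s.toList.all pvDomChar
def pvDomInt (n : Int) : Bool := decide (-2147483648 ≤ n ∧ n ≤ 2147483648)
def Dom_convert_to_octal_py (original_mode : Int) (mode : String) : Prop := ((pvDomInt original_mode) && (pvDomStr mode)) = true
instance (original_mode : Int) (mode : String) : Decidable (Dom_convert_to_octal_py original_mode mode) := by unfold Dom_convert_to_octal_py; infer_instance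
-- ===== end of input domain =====

-- B records the last signed decision per rwx letter in a dict and applies it in a
-- second pass, instead of A's immediate bit mutation at every letter (objective: alternative).
-- stat constants: S_IRUSR=256, S_IRGRP=32, S_IWUSR=128, S_IWGRP=16, S_IXUSR=64, S_IXGRP=8.

-- ===== PORT A =====
-- one iteration of A's `for c in mode` loop; state = (ret, remove)
def pvStepA (s : Int × Bool) (c : Char) : Int × Bool :=
  let rem := if c = '-' then true else if c = '+' then false else s.2
  if rem then
    if c = 'x' then (PySem.Int.band s.1 (Int.not (PySem.Int.bor 64 8)), rem)
    else if c = 'r' then (PySem.Int.band s.1 (Int.not (PySem.Int.bor 256 32)), rem)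
    else if c = 'w' then (PySem.Int.band s.1 (Int.not (PySem.Int.bor 128 16)), rem)
    else (s.1, rem)
  else
    if c = 'x' then (PySem.Int.bor s.1 (PySem.Int.bor 64 8), rem)
    else if c = 'r' then (PySem.Int.bor s.1 (PySem.Int.bor 256 32), rem)
    else if c = 'w' then (PySem.Int.bor s.1 (PySem.Int.bor 128 16), rem)
    else (s.1, rem)

def convert_to_octal_py (original_mode : Int) (mode : String) : Int :=
  (mode.toList.foldl pvStepA (original_mode, false)).1

-- ===== PORT B =====
-- one iteration of B's recording scan; state = (ops, remove)
def pvScanB (s : PySem.Dict Char Bool × Bool) (c : Char) : PySem.Dict Char Bool × Bool :=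
  if c = '-' then (s.1, true)
  else if c = '+' then (s.1, false)
  else if c = 'r' ∨ c = 'w' ∨ c = 'x' then (s.1.insert c s.2, s.2)
  else s

-- Source B inlines the stat masks as octal literals: 0o440 = 288, 0o220 = 144, 0o110 = 72
def pvMaskB (c : Char) : Int :=
  if c = 'r' then 288
  else if c = 'w' then 144
  else 72

-- one iteration of B's apply loop over ops.items()
def pvApplyB (ret : Int) (p : Char × Bool) : Int :=
  if p.2 then PySem.Int.band ret (Int.not (pvMaskB p.1)) else PySem.Int.bor ret (pvMaskB p.1)

def convert_to_octal_py_alt (original_mode : Int) (mode : String) : Int :=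
  let s := mode.toList.foldl pvScanB (PySem.Dict.empty, false)
  s.1.items.foldl pvApplyB original_mode

-- ===== PRECONDITION & SPEC =====
def Spec_convert_to_octal_py (original_mode : Int) (mode : String) (out : Int) : Prop := out = convert_to_octal_py_alt original_mode mode
instance (original_mode : Int) (mode : String) (out : Int) : Decidable (Spec_convert_to_octal_py original_mode mode out) := by unfold Spec_convert_to_octal_py; infer_instance

-- ===== CLAIM (what is proved, stated in full; the proofs are below) =====
def Claim_equal_convert_to_octal_py : Prop := ∀ (original_mode : Int) (mode : String), Dom_convert_to_octal_py original_mode mode → Spec_convert_to_octal_py original_mode mode (convert_to_octal_py original_mode mode)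

-- ===== LEMMAS AND PROOFS =====

-- ---- Nat groundwork ----
theorem pv_or_eq_add (a : Nat) : ∀ b : Nat, a &&& b = 0 → a ||| b = a + b := by
  induction a using Nat.binaryRec with
  | zero => intro b _; simp
  | bit x a ih =>
    intro b h
    cases b using Nat.bitCasesOn with
    | bit y b =>
      rw [Nat.land_bit] at h
      rw [Nat.lor_bit]
      obtain ⟨h1, h2⟩ := Nat.bit_eq_zero_iff.mp h
      rw [Nat.bit_val, Nat.bit_val, Nat.bit_val, ih b h1]
      cases x <;> cases y <;> simp_all <;> omega

theorem pv_sub_and (m n : Nat) : m - (m &&& n) = Nat.ldiff m n := by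
  have hdisj : (m &&& n) &&& Nat.ldiff m n = 0 := by
    apply Nat.eq_of_testBit_eq
    intro i
    simp only [Nat.testBit_land, Nat.testBit_ldiff, Nat.zero_testBit]
    cases m.testBit i <;> cases n.testBit i <;> rfl
  have hsplit : (m &&& n) ||| Nat.ldiff m n = m := by
    apply Nat.eq_of_testBit_eq
    intro i
    simp only [Nat.testBit_lor, Nat.testBit_land, Nat.testBit_ldiff]
    cases m.testBit i <;> cases n.testBit i <;> rfl
  have := pv_or_eq_add (m &&& n) (Nat.ldiff m n) hdisj
  omega

-- ---- bridges: PySem's Python-exact bitwise ops are Mathlib's land/lor/lnot ----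
theorem pv_not_eq_lnot (a : Int) : Int.not a = Int.lnot a := by cases a <;> rfl

theorem pv_neg_negSucc_sub_one (n : Nat) : -(Int.negSucc n) - 1 = (n : Int) := by
  rw [Int.negSucc_eq]; omega

theorem pv_band_eq_land (a b : Int) : PySem.Int.band a b = Int.land a b := by
  cases a with
  | ofNat m =>
    cases b with
    | ofNat n =>
      simp [PySem.Int.band, Int.land]
    | negSucc n =>
      have hb : ¬ (0 ≤ Int.negSucc n) := fun hcontr => (Int.negSucc_not_nonneg n).mp hcontr
      simp only [PySem.Int.band, if_neg hb, pv_neg_negSucc_sub_one]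
      simp [Int.land, pv_sub_and]
  | negSucc m =>
    have ha : ¬ (0 ≤ Int.negSucc m) := fun hcontr => (Int.negSucc_not_nonneg m).mp hcontr
    cases b with
    | ofNat n =>
      simp only [PySem.Int.band, if_neg ha, pv_neg_negSucc_sub_one]
      simp [Int.land, pv_sub_and]
    | negSucc n =>
      have hb : ¬ (0 ≤ Int.negSucc n) := fun hcontr => (Int.negSucc_not_nonneg n).mp hcontr
      simp only [PySem.Int.band, if_neg ha, if_neg hb, pv_neg_negSucc_sub_one]
      simp [Int.land, Int.negSucc_eq]
      omega

theorem pv_bor_eq_lor (a b : Int) : PySem.Int.bor a b = Int.lor a b := by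
  cases a with
  | ofNat m =>
    cases b with
    | ofNat n =>
      simp [PySem.Int.bor, Int.lor]
    | negSucc n =>
      have hb : ¬ (0 ≤ Int.negSucc n) := fun hcontr => (Int.negSucc_not_nonneg n).mp hcontr
      simp only [PySem.Int.bor, if_neg hb, pv_neg_negSucc_sub_one]
      simp [Int.lor, pv_sub_and, Int.negSucc_eq]
      omega
  | negSucc m =>
    have ha : ¬ (0 ≤ Int.negSucc m) := fun hcontr => (Int.negSucc_not_nonneg m).mp hcontr
    cases b with
    | ofNat n =>
      simp only [PySem.Int.bor, if_neg ha, pv_neg_negSucc_sub_one]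
      simp [Int.lor, pv_sub_and, Int.negSucc_eq]
      omega
    | negSucc n =>
      have hb : ¬ (0 ≤ Int.negSucc n) := fun hcontr => (Int.negSucc_not_nonneg n).mp hcontr
      simp only [PySem.Int.bor, if_neg ha, if_neg hb, pv_neg_negSucc_sub_one]
      simp [Int.lor, Int.negSucc_eq]
      omega

-- ---- extensionality over bits for Int ----
theorem pv_int_ext {a b : Int} (h : ∀ k, a.testBit k = b.testBit k) : a = b := by
  cases a with
  | ofNat m =>
    cases b with
    | ofNat n =>
      congr 1
      apply Nat.eq_of_testBit_eq
      intro i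
      simpa [Int.testBit] using h i
    | negSucc n =>
      exfalso
      have hk := h (m + n + 1)
      have hm : m.testBit (m + n + 1) = false :=
        Nat.testBit_lt_two_pow (lt_of_lt_of_le Nat.lt_two_pow_self (Nat.pow_le_pow_right (by omega) (by omega)))
      have hn : n.testBit (m + n + 1) = false :=
        Nat.testBit_lt_two_pow (lt_of_lt_of_le Nat.lt_two_pow_self (Nat.pow_le_pow_right (by omega) (by omega)))
      simp [Int.testBit, hm, hn] at hk
  | negSucc m =>
    cases b with
    | ofNat n =>
      exfalso
      have hk := h (m + n + 1)
      have hm : m.testBit (m + n + 1) = false :=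
        Nat.testBit_lt_two_pow (lt_of_lt_of_le Nat.lt_two_pow_self (Nat.pow_le_pow_right (by omega) (by omega)))
      have hn : n.testBit (m + n + 1) = false :=
        Nat.testBit_lt_two_pow (lt_of_lt_of_le Nat.lt_two_pow_self (Nat.pow_le_pow_right (by omega) (by omega)))
      simp [Int.testBit, hm, hn] at hk
    | negSucc n =>
      congr 1
      apply Nat.eq_of_testBit_eq
      intro i
      have := h i
      simpa [Int.testBit] using this

-- ---- the bit-algebra identities behind set/clear of a mask ----
theorem pv_or_or (x m : Int) : PySem.Int.bor (PySem.Int.bor x m) m = PySem.Int.bor x m := by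
  simp only [pv_bor_eq_lor]
  apply pv_int_ext
  intro k
  simp [Int.testBit_lor]

theorem pv_and_and (x m : Int) :
    PySem.Int.band (PySem.Int.band x (Int.not m)) (Int.not m) = PySem.Int.band x (Int.not m) := by
  simp only [pv_band_eq_land, pv_not_eq_lnot]
  apply pv_int_ext
  intro k
  simp only [Int.testBit_land, Int.testBit_lnot]
  cases x.testBit k <;> cases m.testBit k <;> rfl

theorem pv_or_then_and (x m : Int) :
    PySem.Int.band (PySem.Int.bor x m) (Int.not m) = PySem.Int.band x (Int.not m) := by
  simp only [pv_band_eq_land, pv_bor_eq_lor, pv_not_eq_lnot]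
  apply pv_int_ext
  intro k
  simp only [Int.testBit_land, Int.testBit_lor, Int.testBit_lnot]
  cases x.testBit k <;> cases m.testBit k <;> rfl

theorem pv_and_then_or (x m : Int) :
    PySem.Int.bor (PySem.Int.band x (Int.not m)) m = PySem.Int.bor x m := by
  simp only [pv_band_eq_land, pv_bor_eq_lor, pv_not_eq_lnot]
  apply pv_int_ext
  intro k
  simp only [Int.testBit_land, Int.testBit_lor, Int.testBit_lnot]
  cases x.testBit k <;> cases m.testBit k <;> rfl

theorem pv_or_or_comm (x m n : Int) :
    PySem.Int.bor (PySem.Int.bor x m) n = PySem.Int.bor (PySem.Int.bor x n) m := by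
  simp only [pv_bor_eq_lor]
  apply pv_int_ext
  intro k
  simp only [Int.testBit_lor]
  cases x.testBit k <;> cases m.testBit k <;> cases n.testBit k <;> rfl

theorem pv_and_and_comm (x m n : Int) :
    PySem.Int.band (PySem.Int.band x (Int.not m)) (Int.not n)
      = PySem.Int.band (PySem.Int.band x (Int.not n)) (Int.not m) := by
  simp only [pv_band_eq_land, pv_not_eq_lnot]
  apply pv_int_ext
  intro k
  simp only [Int.testBit_land, Int.testBit_lnot]
  cases x.testBit k <;> cases m.testBit k <;> cases n.testBit k <;> rfl

theorem pv_or_and_comm (x m n : Int) (h : Int.land m n = 0) :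
    PySem.Int.band (PySem.Int.bor x m) (Int.not n)
      = PySem.Int.bor (PySem.Int.band x (Int.not n)) m := by
  simp only [pv_band_eq_land, pv_bor_eq_lor, pv_not_eq_lnot]
  apply pv_int_ext
  intro k
  have hk : (m.testBit k && n.testBit k) = false := by
    rw [← Int.testBit_land m n k, h]
    simp [Int.testBit]
  simp only [Int.testBit_land, Int.testBit_lor, Int.testBit_lnot]
  cases hx : x.testBit k <;> cases hm : m.testBit k <;> cases hn : n.testBit k <;>
    simp_all

-- ---- masks of distinct rwx letters are disjoint ----
def pvRWX (c : Char) : Prop := c = 'r' ∨ c = 'w' ∨ c = 'x'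

theorem pv_mask_disjoint {c c' : Char} (hc : pvRWX c) (hc' : pvRWX c') (hne : c ≠ c') :
    Int.land (pvMaskB c) (pvMaskB c') = 0 := by
  rcases hc with h | h | h <;> rcases hc' with h' | h' | h' <;> subst h <;> subst h' <;>
    first
    | exact absurd rfl hne
    | decide

-- ---- commuting and absorbing applications ----
theorem pv_apply_comm (x : Int) (p q : Char × Bool) (hp : pvRWX p.1) (hq : pvRWX q.1)
    (hne : p.1 ≠ q.1) : pvApplyB (pvApplyB x p) q = pvApplyB (pvApplyB x q) p := by
  obtain ⟨cp, bp⟩ := p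
  obtain ⟨cq, bq⟩ := q
  have hpq := pv_mask_disjoint hp hq hne
  have hqp := pv_mask_disjoint hq hp (fun h => hne h.symm)
  cases bp <;> cases bq <;> simp only [pvApplyB, if_true, Bool.false_eq_true, if_false]
  · exact pv_or_or_comm x (pvMaskB cp) (pvMaskB cq)
  · exact pv_or_and_comm x (pvMaskB cp) (pvMaskB cq) hpq
  · exact (pv_or_and_comm x (pvMaskB cq) (pvMaskB cp) hqp).symm
  · exact pv_and_and_comm x (pvMaskB cp) (pvMaskB cq)

theorem pv_apply_absorb (x : Int) (c : Char) (b0 b : Bool) :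
    pvApplyB (pvApplyB x (c, b0)) (c, b) = pvApplyB x (c, b) := by
  cases b0 <;> cases b <;> simp only [pvApplyB, if_true, Bool.false_eq_true, if_false]
  · exact pv_or_or x (pvMaskB c)
  · exact pv_or_then_and x (pvMaskB c)
  · exact pv_and_then_or x (pvMaskB c)
  · exact pv_and_and x (pvMaskB c)

-- ---- the apply loop over the recorded decisions ----
theorem pv_apply_comm_list (l : List (Char × Bool)) (q : Char × Bool)
    (hl : ∀ p ∈ l, pvRWX p.1) (hq : pvRWX q.1) (hql : ∀ p ∈ l, p.1 ≠ q.1) :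
    ∀ x : Int, l.foldl pvApplyB (pvApplyB x q) = pvApplyB (l.foldl pvApplyB x) q := by
  induction l with
  | nil => intro x; rfl
  | cons p t ih =>
    intro x
    have hcomm := pv_apply_comm x p q (hl p (by simp)) hq (hql p (by simp))
    simp only [List.foldl_cons]
    rw [← hcomm]
    exact ih (fun r hr => hl r (by simp [hr])) (fun r hr => hql r (by simp [hr])) (pvApplyB x p)

theorem pv_apply_map_overwrite (l : List (Char × Bool)) (c : Char) (b : Bool)
    (hl : ∀ p ∈ l, pvRWX p.1) (hc : pvRWX c) (hnd : (l.map Prod.fst).Nodup)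
    (hmem : c ∈ l.map Prod.fst) :
    ∀ x : Int, (l.map (fun p => if p.1 == c then (c, b) else p)).foldl pvApplyB x
      = pvApplyB (l.foldl pvApplyB x) (c, b) := by
  induction l with
  | nil => simp at hmem
  | cons p t ih =>
    intro x
    simp only [List.map_cons, List.nodup_cons, List.mem_map] at hnd
    by_cases hpc : p.1 = c
    · have hbeq : (p.1 == c) = true := by simp [hpc]
      have htno : ∀ r ∈ t, r.1 ≠ c := by
        intro r hr hrc
        exact hnd.1 ⟨r, hr, by rw [hrc, hpc]⟩
      have hmapid : t.map (fun p => if p.1 == c then (c, b) else p) = t := by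
        have hid : ∀ r ∈ t, (if r.1 == c then ((c, b) : Char × Bool) else r) = id r := by
          intro r hr
          simp [htno r hr]
        rw [List.map_congr_left hid, List.map_id]
      simp only [List.map_cons, hbeq, if_true, List.foldl_cons, hmapid]
      have hcl : ∀ r ∈ t, r.1 ≠ c := htno
      rw [← pv_apply_comm_list t (c, b) (fun r hr => hl r (by simp [hr])) hc hcl]
      have : pvApplyB x (c, b) = pvApplyB (pvApplyB x p) (c, b) := by
        obtain ⟨cp, bp⟩ := p
        simp only at hpc
        subst hpc
        exact (pv_apply_absorb x cp bp b).symm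
      rw [this]
    · have hbeq : (p.1 == c) = false := by simp [hpc]
      have hmem' : c ∈ t.map Prod.fst := by
        rcases List.mem_map.mp hmem with ⟨r, hr, hrc⟩
        rcases List.mem_cons.mp hr with h | h
        · exact absurd (h ▸ hrc) hpc
        · exact List.mem_map.mpr ⟨r, h, hrc⟩
      simp only [List.map_cons, hbeq, Bool.false_eq_true, if_false, List.foldl_cons]
      exact ih (fun r hr => hl r (by simp [hr])) hnd.2 hmem' (pvApplyB x p)

-- keys of a Dict are its items' first components, by definition
theorem pv_keys_eq (d : PySem.Dict Char Bool) : d.keys = d.items.map Prod.fst := by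
  simp [PySem.Dict.keys]

theorem pv_apply_insert (d : PySem.Dict Char Bool) (c : Char) (b : Bool)
    (hnd : d.keys.Nodup) (hk : ∀ p ∈ d.items, pvRWX p.1) (hc : pvRWX c) (x : Int) :
    (d.insert c b).items.foldl pvApplyB x = pvApplyB (d.items.foldl pvApplyB x) (c, b) := by
  by_cases hcont : d.contains c = true
  · rw [PySem.Dict.items_insert_of_contains d b hcont]
    have hmem : c ∈ d.items.map Prod.fst := by
      rw [← pv_keys_eq]
      exact (PySem.Dict.contains_iff_mem_keys d c).mp hcont
    exact pv_apply_map_overwrite d.items c b hk hc (pv_keys_eq d ▸ hnd) hmem x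
  · rw [PySem.Dict.items_insert_of_not_contains d b (by simpa using hcont)]
    simp [List.foldl_append, pvApplyB]

-- ---- the main invariant: A's running ret is B's decisions applied to original_mode ----
theorem pv_main (cs : List Char) : ∀ (d : PySem.Dict Char Bool) (rem : Bool) (r0 : Int),
    d.keys.Nodup → (∀ p ∈ d.items, pvRWX p.1) →
    cs.foldl pvStepA (d.items.foldl pvApplyB r0, rem)
      = ((cs.foldl pvScanB (d, rem)).1.items.foldl pvApplyB r0,
         (cs.foldl pvScanB (d, rem)).2) := by
  induction cs with
  | nil => intro d rem r0 _ _; rfl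
  | cons c cs ih =>
    intro d rem r0 hnd hk
    by_cases h1 : c = '-'
    · subst h1
      simp only [List.foldl_cons, pvStepA, pvScanB]
      exact ih d true r0 hnd hk
    · by_cases h2 : c = '+'
      · subst h2
        simp only [List.foldl_cons, pvStepA, pvScanB]
        exact ih d false r0 hnd hk
      · by_cases h3 : c = 'r' ∨ c = 'w' ∨ c = 'x'
        · have hstep : pvStepA (d.items.foldl pvApplyB r0, rem) c
              = (pvApplyB (d.items.foldl pvApplyB r0) (c, rem), rem) := by
            rcases h3 with h | h | h <;> subst h <;> cases rem <;>
              simp [pvStepA, pvApplyB, pvMaskB,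
                show (PySem.Int.bor 256 32 : Int) = 288 from by decide,
                show (PySem.Int.bor 128 16 : Int) = 144 from by decide,
                show (PySem.Int.bor 64 8 : Int) = 72 from by decide]
          have hscan : pvScanB (d, rem) c = (d.insert c rem, rem) := by
            simp [pvScanB, h1, h2, h3]
          simp only [List.foldl_cons, hstep, hscan]
          rw [← pv_apply_insert d c rem hnd hk h3 r0]
          exact ih (d.insert c rem) rem r0 (PySem.Dict.nodup_keys_insert d c rem hnd)
            (by
              intro p hp
              rcases (PySem.Dict.mem_items_insert d c rem p).mp hp with h | h
              · rw [h]; exact h3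
              · exact hk p h.1)
        · have hstep : pvStepA (d.items.foldl pvApplyB r0, rem) c
              = (d.items.foldl pvApplyB r0, rem) := by
            have hx : c ≠ 'x' := fun h => h3 (Or.inr (Or.inr h))
            have hr : c ≠ 'r' := fun h => h3 (Or.inl h)
            have hw : c ≠ 'w' := fun h => h3 (Or.inr (Or.inl h))
            cases rem <;> simp [pvStepA, h1, h2, hx, hr, hw]
          have hscan : pvScanB (d, rem) c = (d, rem) := by
            simp [pvScanB, h1, h2, h3]
          simp only [List.foldl_cons, hstep, hscan]
          exact ih d rem r0 hnd hk

-- ===== VERDICT (by name: the statement is the Claim_ definition above) =====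
theorem convert_to_octal_py_spec : Claim_equal_convert_to_octal_py := by
  intro original_mode mode _
  unfold Spec_convert_to_octal_py convert_to_octal_py convert_to_octal_py_alt
  have h := pv_main mode.toList PySem.Dict.empty false original_mode
    PySem.Dict.nodup_keys_empty (by
      intro p hp
      rw [show (PySem.Dict.empty : PySem.Dict Char Bool).items = [] from rfl] at hp
      cases hp)
  simp only [show (PySem.Dict.empty : PySem.Dict Char Bool).items = [] from rfl,
    List.foldl_nil] at h
  rw [h]
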